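-- pv_equiv track=rewrite | github.com/AatishLanghee/Python_Practice | LBP023_special_number.py | special_number
-- ===== SOURCE A (Python) =====
-- def special_number(num_: int) -> str:
--     original_num: int = num_
--     sum_: int = 0
--     product_: int = 1
--     if 10 <= num_ <= 99:
--         while num_ != 0:
--             digit_: int = num_ % 10
--             sum_ = sum_ + digit_
--             product_ = product_ * digit_
--             num_ = num_ // 10
--
--         if (sum_ + product_) == original_num:
--             return "Special two digit number"
--         else:
--             return "Not a special two digit number"
-- ===== SOURCE B (Python) =====
-- def special_number(num_: int) -> str:
--     if 10 <= num_ <= 99: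
--         tens, ones = divmod(num_, 10)
--         if tens + ones + tens * ones == num_:
--             return "Special two digit number"
--         return "Not a special two digit number"
-- ===== Notes on version B (the rewrite author's own statement) =====
-- stated objective: simpler
-- what changed: Replaced the digit-by-digit while loop (running sum and product with mutable state) by the closed-form two-digit decomposition via divmod(num_, 10).
import Mathlib
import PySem

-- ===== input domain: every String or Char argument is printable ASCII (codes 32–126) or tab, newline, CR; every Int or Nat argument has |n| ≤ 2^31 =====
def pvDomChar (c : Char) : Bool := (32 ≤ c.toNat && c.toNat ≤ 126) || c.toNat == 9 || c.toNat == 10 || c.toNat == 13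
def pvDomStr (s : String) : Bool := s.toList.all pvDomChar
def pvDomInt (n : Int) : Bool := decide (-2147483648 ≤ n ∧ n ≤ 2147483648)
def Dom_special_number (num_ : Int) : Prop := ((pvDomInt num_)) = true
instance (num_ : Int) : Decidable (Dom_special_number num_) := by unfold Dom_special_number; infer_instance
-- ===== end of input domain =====

-- B replaces A's digit-by-digit while loop by the closed-form divmod(num_, 10) decomposition (objective: simpler).


-- ===== PORT A =====
-- while loop of A: digit extraction, accumulating sum and product; fuel makes it total
-- (Python's loop only runs for num_ in [10,99], where fuel num_.toNat+1 is ample)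
def specialLoopA (fuel : Nat) (num sum prod : Int) : Int × Int :=
  match fuel with
  | 0 => (sum, prod)
  | f + 1 =>
    if num ≠ 0 then
      let digit := PySem.Int.mod num 10
      specialLoopA f (PySem.Int.floordiv num 10) (sum + digit) (prod * digit)
    else (sum, prod)

def special_number (num_ : Int) : Option String :=
  let original_num := num_
  if 10 ≤ num_ ∧ num_ ≤ 99 then
    let (sum_, product_) := specialLoopA (num_.toNat + 1) num_ 0 1
    if sum_ + product_ = original_num then some "Special two digit number"
    else some "Not a special two digit number"
  else none

-- ===== PORT B =====
def special_number_alt (num_ : Int) : Option String :=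
  if 10 ≤ num_ ∧ num_ ≤ 99 then
    let tens := PySem.Int.floordiv num_ 10
    let ones := PySem.Int.mod num_ 10
    if tens + ones + tens * ones = num_ then some "Special two digit number"
    else some "Not a special two digit number"
  else none

-- ===== PRECONDITION & SPEC =====
def Spec_special_number (num_ : Int) (out : Option String) : Prop := out = special_number_alt num_
instance (num_ : Int) (out : Option String) : Decidable (Spec_special_number num_ out) := by unfold Spec_special_number; infer_instance

-- ===== CLAIM (what is proved, stated in full; the proofs are below) =====
def Claim_equal_special_number : Prop := ∀ (num_ : Int), Dom_special_number num_ → Spec_special_number num_ (special_number num_)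

-- ===== LEMMAS AND PROOFS =====

-- ===== VERDICT (by name: the statement is the Claim_ definition above) =====
theorem special_number_spec : Claim_equal_special_number := by
  intro n _
  unfold Spec_special_number
  by_cases h : 10 ≤ n ∧ n ≤ 99
  · obtain ⟨h1, h2⟩ := h
    interval_cases n <;> decide
  · simp [special_number, special_number_alt, h]
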